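-- pv_equiv track=rewrite | github.com/nghiatt90/cs-practice | codelearn/magicnumber.py | magicNumber
-- ===== SOURCE A (Python) =====
-- def magicNumber(n):
--     a = [3**i for i in range(20)]
--     b = [5**i for i in range(20)]
--     c = [7**i for i in range(20)]
--     t = []
--     for x in a:
--         for y in b:
--             for z in c:
--                 t.append(x*y*z)
--     return sorted(t)[n-1]
-- ===== SOURCE B (Python) =====
-- def magicNumber(n):
--     def merge(xs, ys):
--         out = []
--         i = j = 0
--         while i < len(xs) and j < len(ys):
--             if xs[i] <= ys[j]:
--                 out.append(xs[i]); i += 1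
--             else:
--                 out.append(ys[j]); j += 1
--         out.extend(xs[i:])
--         out.extend(ys[j:])
--         return out
--     res = []
--     for i in range(20):
--         p = 3 ** i
--         for j in range(20):
--             q = p * 5 ** j
--             res = merge(res, [q * 7 ** k for k in range(20)])
--     return res[n - 1]
-- ===== Notes on version B (the rewrite author's own statement) =====
-- stated objective: alternative
-- what changed: B never builds an unsorted list and sorts it: for each pair of exponents of 3 and 5 it generates the already-sorted row of increasing powers of 7 and folds each row into the running result with a two-pointer merge, so the final sort pass disappears.
import Mathlib
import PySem

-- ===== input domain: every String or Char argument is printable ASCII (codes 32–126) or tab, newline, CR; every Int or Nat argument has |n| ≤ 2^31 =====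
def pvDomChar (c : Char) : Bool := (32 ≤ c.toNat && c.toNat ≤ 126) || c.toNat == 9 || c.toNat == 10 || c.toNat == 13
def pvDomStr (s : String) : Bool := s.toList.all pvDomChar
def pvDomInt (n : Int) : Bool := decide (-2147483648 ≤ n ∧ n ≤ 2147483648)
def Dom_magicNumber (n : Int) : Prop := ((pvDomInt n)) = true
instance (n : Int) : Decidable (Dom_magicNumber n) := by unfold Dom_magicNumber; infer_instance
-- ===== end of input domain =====

-- B replaces A's triple nested loop + final sort by an incremental two-way merge of 400
-- already-sorted geometric rows (objective: alternative decomposition, no sort pass).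

-- ===== PORT A =====
def magicNumber (n : Int) : Int :=
  let a := (PySem.List.pyRange 0 20 1).map (fun i => (3:Int) ^ i.toNat)
  let b := (PySem.List.pyRange 0 20 1).map (fun i => (5:Int) ^ i.toNat)
  let c := (PySem.List.pyRange 0 20 1).map (fun i => (7:Int) ^ i.toNat)
  let t : List Int := a.foldl (fun t x =>
      b.foldl (fun t y =>
        c.foldl (fun t z => t ++ [x*y*z]) t) t) []
  (PySem.List.pyGet? (PySem.List.sorted t (fun v => v) false) (n-1)).getD 0

-- ===== PORT B =====
-- transliteration of Source B's hand-written two-pointer merge (index advance = dropping heads)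
def pvMerge : List Int → List Int → List Int
  | [], ys => ys
  | x :: xs, [] => x :: xs
  | x :: xs, y :: ys =>
      if x ≤ y then x :: pvMerge xs (y :: ys)
      else y :: pvMerge (x :: xs) ys

def magicNumber_alt (n : Int) : Int :=
  let res := (PySem.List.pyRange 0 20 1).foldl (fun res i =>
      let p := (3:Int) ^ i.toNat
      (PySem.List.pyRange 0 20 1).foldl (fun res j =>
        let q := p * (5:Int) ^ j.toNat
        pvMerge res ((PySem.List.pyRange 0 20 1).map (fun k => q * (7:Int) ^ k.toNat))) res) []
  (PySem.List.pyGet? res (n-1)).getD 0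

-- ===== PRECONDITION & SPEC =====
-- Python A raises IndexError exactly when n-1 is out of range for the 8000-element list.
def Pre_magicNumber (n : Int) : Prop := -7999 ≤ n ∧ n ≤ 8000
instance (n : Int) : Decidable (Pre_magicNumber n) := by unfold Pre_magicNumber; infer_instance
def pvWitness_magicNumber : Int := 1

def Spec_magicNumber (n : Int) (out : Int) : Prop := out = magicNumber_alt n
instance (n : Int) (out : Int) : Decidable (Spec_magicNumber n out) := by unfold Spec_magicNumber; infer_instance

-- ===== CLAIM (what is proved, stated in full; the proofs are below) =====
def Claim_equal_magicNumber : Prop := ∀ (n : Int), Dom_magicNumber n → Pre_magicNumber n → Spec_magicNumber n (magicNumber n)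

-- ===== LEMMAS AND PROOFS =====

theorem pvMerge_perm (xs ys : List Int) : (pvMerge xs ys).Perm (xs ++ ys) := by
  fun_induction pvMerge xs ys with
  | case1 ys => simp
  | case2 x xs => simp
  | case3 x xs y ys h ih => simpa using ih.cons x
  | case4 x xs y ys h ih =>
      exact (ih.cons y).trans List.perm_middle.symm

theorem pvMerge_pairwise {xs ys : List Int}
    (hx : xs.Pairwise (· ≤ ·)) (hy : ys.Pairwise (· ≤ ·)) :
    (pvMerge xs ys).Pairwise (· ≤ ·) := by
  fun_induction pvMerge xs ys with
  | case1 ys => exact hy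
  | case2 x xs => exact hx
  | case3 x xs y ys h ih =>
      rw [List.pairwise_cons] at hx ⊢
      refine ⟨?_, ih hx.2 hy⟩
      intro z hz
      have := (pvMerge_perm xs (y :: ys)).mem_iff.mp hz
      rcases List.mem_append.mp this with h1 | h1
      · exact hx.1 z h1
      · rcases List.mem_cons.mp h1 with rfl | h2
        · exact h
        · exact le_trans h ((List.pairwise_cons.mp hy).1 z h2)
  | case4 x xs y ys h ih =>
      rw [List.pairwise_cons] at hy ⊢
      rw [Int.not_le] at h
      refine ⟨?_, ih hx hy.2⟩
      intro z hz
      have := (pvMerge_perm (x :: xs) ys).mem_iff.mp hz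
      rcases List.mem_append.mp this with h1 | h1
      · rcases List.mem_cons.mp h1 with rfl | h2
        · exact le_of_lt h
        · exact le_trans (le_of_lt h) ((List.pairwise_cons.mp hx).1 z h2)
      · exact hy.1 z h1

-- nested fold of a fold over generated lists = one fold over the flattened list
theorem foldl_foldl {α β γ : Type} (f : γ → β → γ) (g : α → List β) (L : List α) (acc : γ) :
    L.foldl (fun a x => (g x).foldl f a) acc = (L.flatMap g).foldl f acc := by
  induction L generalizing acc with
  | nil => rfl
  | cons x L ih => simp [List.flatMap_cons, List.foldl_append, ih]

-- merging a list of sorted rows: result is sorted and a permutation of the concatenation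
theorem foldl_pvMerge_sorted_perm (rows : List (List Int)) (acc : List Int)
    (hacc : acc.Pairwise (· ≤ ·)) (hrows : ∀ r ∈ rows, r.Pairwise (· ≤ ·)) :
    (rows.foldl pvMerge acc).Pairwise (· ≤ ·) ∧
      (rows.foldl pvMerge acc).Perm (acc ++ rows.flatMap id) := by
  induction rows generalizing acc with
  | nil => simpa using hacc
  | cons r rows ih =>
      have hr : r.Pairwise (· ≤ ·) := hrows r (List.mem_cons_self ..)
      have h1 := ih (pvMerge acc r) (pvMerge_pairwise hacc hr)
        (fun s hs => hrows s (List.mem_cons_of_mem _ hs))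
      refine ⟨h1.1, ?_⟩
      refine (h1.2.trans (((pvMerge_perm acc r).append_right _).trans ?_))
      simp [List.flatMap_cons, List.append_assoc]

-- each geometric row c * 7^k, k = 0..19, is sorted (c ≥ 0)
theorem row_pairwise (c : Int) (hc : 0 ≤ c) :
    (((PySem.List.pyRange 0 20 1).map (fun k => c * (7:Int) ^ k.toNat)).Pairwise (· ≤ ·)) := by
  refine List.Pairwise.map _ ?_ (PySem.List.pairwise_lt_pyRange_one 0 20)
  intro a b hab
  have h7 : (7:Int) ^ a.toNat ≤ 7 ^ b.toNat :=
    pow_le_pow_right₀ (by norm_num) (Int.toNat_le_toNat (le_of_lt hab))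
  exact mul_le_mul_of_nonneg_left h7 hc

theorem magic_lists_eq :
    ((PySem.List.pyRange 0 20 1).foldl (fun res i =>
      let p := (3:Int) ^ i.toNat
      (PySem.List.pyRange 0 20 1).foldl (fun res j =>
        let q := p * (5:Int) ^ j.toNat
        pvMerge res ((PySem.List.pyRange 0 20 1).map (fun k => q * (7:Int) ^ k.toNat))) res) []) =
    PySem.List.sorted
      (((PySem.List.pyRange 0 20 1).map (fun i => (3:Int) ^ i.toNat)).foldl (fun t x =>
        (((PySem.List.pyRange 0 20 1).map (fun i => (5:Int) ^ i.toNat)).foldl (fun t y =>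
          (((PySem.List.pyRange 0 20 1).map (fun i => (7:Int) ^ i.toNat)).foldl
            (fun t z => t ++ [x*y*z]) t)) t)) [])
      (fun v => v) false := by
  -- the 400 geometric rows B merges, as a list of lists
  set rows : List (List Int) := (PySem.List.pyRange 0 20 1).flatMap (fun i =>
      (PySem.List.pyRange 0 20 1).map (fun j =>
        (PySem.List.pyRange 0 20 1).map (fun k =>
          (3:Int) ^ i.toNat * 5 ^ j.toNat * 7 ^ k.toNat))) with hrows_def
  -- A's triple loop builds exactly the concatenation of those rows
  have hA :
      (((PySem.List.pyRange 0 20 1).map (fun i => (3:Int) ^ i.toNat)).foldl (fun t x =>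
        (((PySem.List.pyRange 0 20 1).map (fun i => (5:Int) ^ i.toNat)).foldl (fun t y =>
          (((PySem.List.pyRange 0 20 1).map (fun i => (7:Int) ^ i.toNat)).foldl
            (fun t z => t ++ [x*y*z]) t)) t)) []) = rows.flatten := by
    simp only [PySem.List.foldl_append_singleton_eq_map, PySem.List.foldl_append_eq_flatMap,
      hrows_def, List.map_map, List.nil_append, List.flatMap_def, List.flatten_flatten,
      Function.comp_def]
  -- B's nested folds are one merge-fold over those rows
  have hB :
      ((PySem.List.pyRange 0 20 1).foldl (fun res i =>
        let p := (3:Int) ^ i.toNat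
        (PySem.List.pyRange 0 20 1).foldl (fun res j =>
          let q := p * (5:Int) ^ j.toNat
          pvMerge res ((PySem.List.pyRange 0 20 1).map (fun k => q * (7:Int) ^ k.toNat))) res) []) =
      rows.foldl pvMerge [] := by
    have hfun : (fun (res : List Int) (i : Int) =>
        (PySem.List.pyRange 0 20 1).foldl (fun res j =>
          pvMerge res ((PySem.List.pyRange 0 20 1).map
            (fun k => (3:Int) ^ i.toNat * (5:Int) ^ j.toNat * (7:Int) ^ k.toNat))) res) =
        (fun (res : List Int) (i : Int) =>
          ((PySem.List.pyRange 0 20 1).map (fun j =>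
            (PySem.List.pyRange 0 20 1).map (fun k =>
              (3:Int) ^ i.toNat * 5 ^ j.toNat * 7 ^ k.toNat))).foldl pvMerge res) := by
      funext res i
      rw [List.foldl_map]
    show ((PySem.List.pyRange 0 20 1).foldl (fun (res : List Int) (i : Int) =>
        (PySem.List.pyRange 0 20 1).foldl (fun res j =>
          pvMerge res ((PySem.List.pyRange 0 20 1).map
            (fun k => (3:Int) ^ i.toNat * (5:Int) ^ j.toNat * (7:Int) ^ k.toNat))) res) []) = _
    rw [hfun, foldl_foldl pvMerge, hrows_def]
  -- every row is sorted
  have hsorted : ∀ r ∈ rows, r.Pairwise (· ≤ ·) := by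
    intro r hr
    rw [hrows_def] at hr
    rcases List.mem_flatMap.mp hr with ⟨i, _, hi⟩
    rcases List.mem_map.mp hi with ⟨j, _, rfl⟩
    exact row_pairwise _ (by positivity)
  have hmain := foldl_pvMerge_sorted_perm rows [] (by simp) hsorted
  rw [hA, hB]
  symm
  exact PySem.List.sorted_id_eq_of_perm_of_pairwise _ _ (by simpa using hmain.2) hmain.1

-- ===== VERDICT (by name: the statement is the Claim_ definition above) =====
theorem magicNumber_spec : Claim_equal_magicNumber := by
  intro n _ _
  unfold Spec_magicNumber magicNumber magicNumber_alt
  rw [magic_lists_eq]
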